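-- pv_equiv track=rewrite | github.com/LineageOS/android_libcore | tools/expected_upstream/ojluni_modify_expectation.py | translate_src_path_to_ojluni_path
-- ===== SOURCE A (Python) =====
-- UPSTREAM_JAVA_BASE_PATHS = [
--     'jdk/src/share/classes/',
--     'src/java.base/share/classes/',
-- ]
--
-- UPSTREAM_TEST_PATHS = [
--     'jdk/test/',
--     'test/jdk/',
-- ]
--
-- OJLUNI_JAVA_BASE_PATH = 'ojluni/src/main/java/'
--
-- OJLUNI_TEST_PATH = 'ojluni/src/'
--
-- def translate_src_path_to_ojluni_path(src_path: str) -> str: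
--   """Returns None if the path can be translated into a ojluni/ path."""
--   relative_path = None
--   for base_path in UPSTREAM_TEST_PATHS:
--     if src_path.startswith(base_path):
--       length = len(base_path)
--       relative_path = src_path[length:]
--       break
--
--   if relative_path:
--     return f'{OJLUNI_TEST_PATH}test/{relative_path}'
--
--   for base_path in UPSTREAM_JAVA_BASE_PATHS:
--     if src_path.startswith(base_path):
--       length = len(base_path)
--       relative_path = src_path[length:]
--       break
--
--   if relative_path:
--     return f'{OJLUNI_JAVA_BASE_PATH}{relative_path}'
--
--   return None
-- ===== SOURCE B (Python) =====
-- # Route an upstream source path to its ojluni location by its leading path components.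
--
-- def translate_src_path_to_ojluni_path(src_path: str) -> str:
--   parts = src_path.split('/')
--   if parts[:2] in (['jdk', 'test'], ['test', 'jdk']) and len(parts) > 2:
--     return 'ojluni/src/test/' + '/'.join(parts[2:])
--   if (parts[:4] in (['jdk', 'src', 'share', 'classes'],
--                     ['src', 'java.base', 'share', 'classes'])
--       and len(parts) > 4):
--     return 'ojluni/src/main/java/' + '/'.join(parts[4:])
--   return None
-- ===== Notes on version B (the rewrite author's own statement) =====
-- stated objective: alternative
-- what changed: B tokenizes the path into slash-separated components and pattern-matches the leading segments (then rejoins the remaining components), instead of A's two sequential scans over string-prefix lists with a mutable relative_path and truthiness guards.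
-- intended difference: On the four inputs exactly equal to an upstream prefix (e.g. 'jdk/test/'), A's truthiness guard on the empty relative part makes it return None, while B returns the bare target directory (e.g. 'ojluni/src/test/'), the intended translation of the directory itself. — e.g. on translate_src_path_to_ojluni_path("jdk/test/"): A returns none, B returns some "ojluni/src/test/"
import Mathlib
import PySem

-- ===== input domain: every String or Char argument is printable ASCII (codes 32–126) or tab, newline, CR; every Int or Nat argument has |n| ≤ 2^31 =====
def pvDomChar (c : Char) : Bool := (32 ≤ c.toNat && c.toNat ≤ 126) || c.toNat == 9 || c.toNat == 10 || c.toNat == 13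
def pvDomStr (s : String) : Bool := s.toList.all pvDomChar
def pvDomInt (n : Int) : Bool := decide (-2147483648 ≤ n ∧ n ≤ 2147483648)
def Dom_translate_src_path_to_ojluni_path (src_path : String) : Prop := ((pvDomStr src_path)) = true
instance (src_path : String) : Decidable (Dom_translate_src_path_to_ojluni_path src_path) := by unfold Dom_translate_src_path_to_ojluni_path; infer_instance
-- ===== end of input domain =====

-- B tokenizes the path into '/'-separated components and pattern-matches the leading
-- segments instead of scanning string prefixes (objective: alternative); on the four
-- inputs equal to a bare prefix B returns the target directory where A returns None (D_).

-- ===== PORT A =====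
def UPSTREAM_JAVA_BASE_PATHS : List String :=
  ["jdk/src/share/classes/", "src/java.base/share/classes/"]

def UPSTREAM_TEST_PATHS : List String := ["jdk/test/", "test/jdk/"]

def OJLUNI_JAVA_BASE_PATH : String := "ojluni/src/main/java/"

def OJLUNI_TEST_PATH : String := "ojluni/src/"

-- 'for base_path in paths: if src_path.startswith(base_path): relative_path = src_path[length:]; break'
-- (rel is the value of relative_path before the loop; kept if no prefix matches)
def pvScan (paths : List String) (src_path : String) (rel : Option String) : Option String :=
  match paths with
  | [] => rel
  | p :: rest =>
      if PySem.Str.startswith src_path p then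
        some (PySem.Str.slice src_path (some (PySem.Str.len p)) none)
      else pvScan rest src_path rel

-- 'if relative_path:' — None and '' are falsy
def pvTruthy : Option String → Bool
  | none => false
  | some r => r ≠ ""

def translate_src_path_to_ojluni_path (src_path : String) : Option String :=
  let rel₁ := pvScan UPSTREAM_TEST_PATHS src_path none
  if pvTruthy rel₁ then some (OJLUNI_TEST_PATH ++ "test/" ++ rel₁.getD "")
  else
    let rel₂ := pvScan UPSTREAM_JAVA_BASE_PATHS src_path rel₁
    if pvTruthy rel₂ then some (OJLUNI_JAVA_BASE_PATH ++ rel₂.getD "")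
    else none

-- ===== PORT B =====
-- parts = src_path.split('/'); route by the leading components
def translate_src_path_to_ojluni_path_alt (src_path : String) : Option String :=
  let parts := (PySem.Str.split? src_path "/").getD []
  if (PySem.List.slice parts none (some 2) = ["jdk", "test"] ∨
      PySem.List.slice parts none (some 2) = ["test", "jdk"]) ∧ 2 < parts.length then
    some ("ojluni/src/test/" ++ PySem.Str.join "/" (PySem.List.slice parts (some 2) none))
  else if (PySem.List.slice parts none (some 4) = ["jdk", "src", "share", "classes"] ∨
           PySem.List.slice parts none (some 4) = ["src", "java.base", "share", "classes"]) ∧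
          4 < parts.length then
    some ("ojluni/src/main/java/" ++ PySem.Str.join "/" (PySem.List.slice parts (some 4) none))
  else
    none

-- ===== PRECONDITION & SPEC =====
-- On a path equal to one of the four upstream prefixes (empty relative part) A's truthiness
-- guard makes it return None; B returns the bare target directory, the intended translation.
def D_translate_src_path_to_ojluni_path (src_path : String) : Prop :=
  src_path = "jdk/test/" ∨ src_path = "test/jdk/" ∨
  src_path = "jdk/src/share/classes/" ∨ src_path = "src/java.base/share/classes/"
instance (src_path : String) : Decidable (D_translate_src_path_to_ojluni_path src_path) := by
  unfold D_translate_src_path_to_ojluni_path; infer_instance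

def Spec_translate_src_path_to_ojluni_path (src_path : String) (out : Option String) : Prop :=
  ¬ D_translate_src_path_to_ojluni_path src_path → out = translate_src_path_to_ojluni_path_alt src_path
instance (src_path : String) (out : Option String) : Decidable (Spec_translate_src_path_to_ojluni_path src_path out) := by
  unfold Spec_translate_src_path_to_ojluni_path; infer_instance

def pvDiffWitness_translate_src_path_to_ojluni_path : String := "jdk/test/"
def pvDiffWitnessOut_translate_src_path_to_ojluni_path : (Option String) × (Option String) :=
  (none, some "ojluni/src/test/")

-- ===== CLAIM (what is proved, stated in full; the proofs are below) =====
def Claim_unchanged_translate_src_path_to_ojluni_path : Prop := ∀ (src_path : String), Dom_translate_src_path_to_ojluni_path src_path → Spec_translate_src_path_to_ojluni_path src_path (translate_src_path_to_ojluni_path src_path)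
def Claim_changed_translate_src_path_to_ojluni_path : Prop := Dom_translate_src_path_to_ojluni_path (pvDiffWitness_translate_src_path_to_ojluni_path) ∧ D_translate_src_path_to_ojluni_path (pvDiffWitness_translate_src_path_to_ojluni_path) ∧ translate_src_path_to_ojluni_path (pvDiffWitness_translate_src_path_to_ojluni_path) = pvDiffWitnessOut_translate_src_path_to_ojluni_path.1 ∧ translate_src_path_to_ojluni_path_alt (pvDiffWitness_translate_src_path_to_ojluni_path) = pvDiffWitnessOut_translate_src_path_to_ojluni_path.2 ∧ pvDiffWitnessOut_translate_src_path_to_ojluni_path.1 ≠ pvDiffWitnessOut_translate_src_path_to_ojluni_path.2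
def Claim_exact_translate_src_path_to_ojluni_path : Prop := ∀ (src_path : String), Dom_translate_src_path_to_ojluni_path src_path → D_translate_src_path_to_ojluni_path src_path → translate_src_path_to_ojluni_path src_path ≠ translate_src_path_to_ojluni_path_alt src_path

-- ===== LEMMAS AND PROOFS =====

-- PySem.Chars.splitOn.go at separator ['/'] computes List.splitOn '/'
lemma pvGoSlash (fuel : Nat) : ∀ (l cur : List Char) (acc : List (List Char)), l.length < fuel →
    PySem.Chars.splitOn.go ['/'] fuel l cur acc
      = acc.reverse ++ (l.splitOn '/').modifyHead (cur.reverse ++ ·) := by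
  induction fuel with
  | zero => intro l cur acc h; omega
  | succ n ih =>
    intro l cur acc h
    cases l with
    | nil => simp [PySem.Chars.splitOn.go, List.splitOn]
    | cons c rest =>
      by_cases hc : c = '/'
      · subst hc
        rw [show PySem.Chars.splitOn.go ['/'] (n+1) ('/' :: rest) cur acc
              = PySem.Chars.splitOn.go ['/'] n rest [] (cur.reverse :: acc) by
            simp [PySem.Chars.splitOn.go, List.isPrefixOf]]
        rw [ih rest [] _ (by simpa using h)]
        simp [List.splitOn, List.splitOnP_cons]
        rcases hsp : List.splitOnP (· == '/') rest with _ | ⟨x, xs⟩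
        · exact absurd hsp (List.splitOnP_ne_nil _ _)
        · simp
      · rw [show PySem.Chars.splitOn.go ['/'] (n+1) (c :: rest) cur acc
              = PySem.Chars.splitOn.go ['/'] n rest (c :: cur) acc by
            have hc' : ¬ ('/' = c) := fun hh => hc hh.symm
            simp [PySem.Chars.splitOn.go, List.isPrefixOf, hc']]
        rw [ih rest (c :: cur) _ (by simpa using h)]
        simp [List.splitOn, List.splitOnP_cons, hc]
        rcases hsp : List.splitOnP (· == '/') rest with _ | ⟨x, xs⟩
        · exact absurd hsp (List.splitOnP_ne_nil _ _)
        · simp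

lemma pvCharsSplitOn_slash (cs : List Char) :
    PySem.Chars.splitOn cs ['/'] = cs.splitOn '/' := by
  rw [PySem.Chars.splitOn, pvGoSlash _ _ _ _ (by omega)]
  rcases hsp : cs.splitOn '/' with _ | ⟨x, xs⟩
  · exact absurd hsp (List.splitOnP_ne_nil _ _)
  · simp

-- splitting off one no-slash segment
lemma pvSplitOn_seg (a r : List Char) (ha : '/' ∉ a) :
    (a ++ '/' :: r).splitOn '/' = a :: r.splitOn '/' := by
  induction a with
  | nil => simp [List.splitOn, List.splitOnP_cons]
  | cons c a ih =>
    have hc : (c == '/') = false := by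
      simp only [beq_eq_false_iff_ne]; rintro rfl; exact ha (List.mem_cons_self ..)
    have ih' := ih (fun hm => ha (List.mem_cons_of_mem _ hm))
    simp only [List.splitOn] at ih' ⊢
    rw [List.cons_append, List.splitOnP_cons, hc]
    simp [ih']

lemma pvSplitOn_flatten (segs : List (List Char)) (h : ∀ a ∈ segs, '/' ∉ a) (r : List Char) :
    ((segs.map (· ++ ['/'])).flatten ++ r).splitOn '/' = segs ++ r.splitOn '/' := by
  induction segs with
  | nil => simp
  | cons a segs ih =>
    have ha := h a (List.mem_cons_self ..)
    have ih' := ih (fun b hb => h b (List.mem_cons_of_mem _ hb))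
    simp only [List.map_cons, List.flatten_cons, List.append_assoc, List.cons_append, List.nil_append]
    rw [show a ++ ('/' :: ((segs.map (· ++ ['/'])).flatten ++ r))
          = a ++ '/' :: ((segs.map (· ++ ['/'])).flatten ++ r) from rfl,
        pvSplitOn_seg _ _ ha, ih']

lemma pvIntercalate_cons (a : List Char) (l : List (List Char)) (hl : l ≠ []) :
    ['/'].intercalate (a :: l) = a ++ '/' :: ['/'].intercalate l := by
  obtain ⟨b, l, rfl⟩ := List.exists_cons_of_ne_nil hl
  simp [List.intercalate, List.intersperse]

lemma pvIntercalate_flatten (segs rest : List (List Char)) (hr : rest ≠ []) :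
    ['/'].intercalate (segs ++ rest) = (segs.map (· ++ ['/'])).flatten ++ ['/'].intercalate rest := by
  induction segs with
  | nil => simp
  | cons a segs ih =>
    rw [List.cons_append, pvIntercalate_cons _ _ (by simp [hr]), ih]
    simp

-- the B-side guard holds exactly when the corresponding A-side prefix matches
lemma pvMatch_iff (segs : List (List Char)) (h : ∀ a ∈ segs, '/' ∉ a) (s : List Char) :
    ((s.splitOn '/').take segs.length = segs ∧ segs.length < (s.splitOn '/').length)
      ↔ ∃ r, s = (segs.map (· ++ ['/'])).flatten ++ r := by
  constructor
  · rintro ⟨ht, hl⟩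
    refine ⟨['/'].intercalate ((s.splitOn '/').drop segs.length), ?_⟩
    have hd : s.splitOn '/' = segs ++ (s.splitOn '/').drop segs.length := by
      conv_lhs => rw [← List.take_append_drop segs.length (s.splitOn '/')]
      rw [ht]
    have hne : (s.splitOn '/').drop segs.length ≠ [] := by
      intro hnil
      have := List.drop_eq_nil_iff.mp hnil
      omega
    conv_lhs => rw [← List.intercalate_splitOn s '/', hd]
    exact pvIntercalate_flatten _ _ hne
  · rintro ⟨r, rfl⟩
    rw [pvSplitOn_flatten segs h r]
    have hne : r.splitOn '/' ≠ [] := List.splitOnP_ne_nil _ _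
    constructor
    · simp
    · have : 0 < (r.splitOn '/').length := List.length_pos_iff.mpr hne
      simp; omega

lemma pvMapOfList_eq_iff (l : List (List Char)) (strs : List String) :
    l.map String.ofList = strs ↔ l = strs.map String.toList := by
  constructor
  · rintro rfl; simp [Function.comp_def]
  · rintro rfl; simp [Function.comp_def, String.ofList_toList]

lemma pvSlice2 (l : List String) : PySem.List.slice l none (some 2) = l.take 2 := by
  simpa using PySem.List.slice_to l (b := 2) (by omega)

lemma pvSlice4 (l : List String) : PySem.List.slice l none (some 4) = l.take 4 := by
  simpa using PySem.List.slice_to l (b := 4) (by omega)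

lemma pvNoMatch (s : String) (strs : List String) (segs : List (List Char))
    (hsegs : strs.map String.toList = segs) (h : ∀ a ∈ segs, '/' ∉ a) (pre : List Char)
    (hpre : (segs.map (· ++ ['/'])).flatten = pre) (hne : ¬ ∃ r, s.toList = pre ++ r) :
    ¬ (((s.toList.splitOn '/').map String.ofList).take segs.length = strs ∧
        segs.length < ((s.toList.splitOn '/').map String.ofList).length) := by
  rintro ⟨ht, hl⟩
  apply hne
  rw [← hpre]
  apply (pvMatch_iff segs h s.toList).mp
  refine ⟨?_, by rw [List.length_map] at hl; exact hl⟩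
  rw [← List.map_take] at ht
  rw [(pvMapOfList_eq_iff _ _).mp ht, hsegs]

lemma pvJoinDrop (s : String) (r : List Char) (tail : List (List Char)) (n : Nat)
    (hps : s.toList.splitOn '/' = tail ++ r.splitOn '/') (hn : tail.length = n) :
    (PySem.Str.join "/" (((s.toList.splitOn '/').map String.ofList).drop n)).toList = r := by
  rw [PySem.Str.toList_join, ← List.map_drop, hps, ← hn, List.drop_left, List.map_map]
  have hid : (String.toList ∘ String.ofList) = id := by funext l; simp
  rw [hid, List.map_id,
      show PySem.Chars.join "/".toList (r.splitOn '/') = ['/'].intercalate (r.splitOn '/') from rfl,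
      List.intercalate_splitOn]

lemma pvSwFalse (s : String) (p : List Char) (hne : ¬ ∃ r, s.toList = p ++ r) :
    PySem.Chars.startswith s.toList p = false := by
  rw [Bool.eq_false_iff]
  intro h
  rw [PySem.Chars.startswith_iff] at h
  obtain ⟨t, ht⟩ := h
  exact hne ⟨t, ht.symm⟩

theorem translate_src_path_to_ojluni_path_spec : Claim_unchanged_translate_src_path_to_ojluni_path := by
  intro s _ hD
  show translate_src_path_to_ojluni_path s = translate_src_path_to_ojluni_path_alt s
  have hparts : (PySem.Str.split? s "/").getD [] = (s.toList.splitOn '/').map String.ofList := by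
    simp [PySem.Str.split?, PySem.Chars.split?, pvCharsSplitOn_slash]
  by_cases e1 : ∃ r, s.toList = "jdk/test/".toList ++ r
  · obtain ⟨r, hr⟩ := e1
    have hr0 : r ≠ [] := by
      rintro rfl
      exact hD (Or.inl (String.toList_inj.mp (by simpa using hr)))
    have hsw : PySem.Chars.startswith s.toList ['j','d','k','/','t','e','s','t','/'] = true := by
      rw [PySem.Chars.startswith_iff]
      exact ⟨r, by simpa using hr.symm⟩
    have hps : s.toList.splitOn '/' = "jdk".toList :: "test".toList :: r.splitOn '/' := by
      rw [hr, show "jdk/test/".toList = ((["jdk".toList, "test".toList].map (· ++ ['/'])).flatten) from by decide,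
          pvSplitOn_flatten _ (by decide) r]
      rfl
    have hslice : (PySem.Str.slice s (some (9 : Int)) none).toList = r := by
      rw [show (9 : Int) = ((9 : Nat) : Int) from by norm_num]
      simp only [PySem.Str.toList_slice, PySem.Chars.slice_eq_listSlice, PySem.List.slice_from_natCast]
      rw [hr, show (9 : Nat) = "jdk/test/".toList.length from by decide, List.drop_left]
    have hne : PySem.Str.slice s (some (9 : Int)) none ≠ "" := by
      intro h0; apply hr0; rw [← hslice, h0]; rfl
    have hA : translate_src_path_to_ojluni_path s
        = some (OJLUNI_TEST_PATH ++ "test/" ++ PySem.Str.slice s (some (9 : Int)) none) := by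
      simp [translate_src_path_to_ojluni_path, pvScan, UPSTREAM_TEST_PATHS, pvTruthy, hsw, hne]
    have hc1 : ((s.toList.splitOn '/').map String.ofList).take 2 = ["jdk", "test"] := by
      rw [← List.map_take, hps]; rfl
    have hlen : 2 < ((s.toList.splitOn '/').map String.ofList).length := by
      have hpos := List.length_pos_iff.mpr (List.splitOnP_ne_nil (· == '/') r)
      rw [List.length_map, hps]
      simp only [List.length_cons, List.splitOn] at *
      omega
    rw [hA]
    unfold translate_src_path_to_ojluni_path_alt
    simp only [hparts, pvSlice2, pvSlice4]
    rw [if_pos ⟨Or.inl hc1, hlen⟩]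
    refine congrArg some (String.toList_inj.mp ?_)
    rw [show PySem.List.slice ((s.toList.splitOn '/').map String.ofList) (some (2 : Int)) none
          = ((s.toList.splitOn '/').map String.ofList).drop 2 from PySem.List.slice_from_natCast _ 2]
    rw [String.toList_append, String.toList_append, String.toList_append, hslice,
        pvJoinDrop s r ["jdk".toList, "test".toList] 2 (by rw [hps]; rfl) rfl]
    simp [OJLUNI_TEST_PATH]
  · by_cases e2 : ∃ r, s.toList = "test/jdk/".toList ++ r
    · obtain ⟨r, hr⟩ := e2
      have hr0 : r ≠ [] := by
        rintro rfl
        exact hD (Or.inr (Or.inl (String.toList_inj.mp (by simpa using hr))))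
      have hf1 : PySem.Chars.startswith s.toList ['j','d','k','/','t','e','s','t','/'] = false :=
        pvSwFalse s _ e1
      have hsw : PySem.Chars.startswith s.toList ['t','e','s','t','/','j','d','k','/'] = true := by
        rw [PySem.Chars.startswith_iff]
        exact ⟨r, by simpa using hr.symm⟩
      have hps : s.toList.splitOn '/' = "test".toList :: "jdk".toList :: r.splitOn '/' := by
        rw [hr, show "test/jdk/".toList = ((["test".toList, "jdk".toList].map (· ++ ['/'])).flatten) from by decide,
            pvSplitOn_flatten _ (by decide) r]
        rfl
      have hslice : (PySem.Str.slice s (some (9 : Int)) none).toList = r := by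
        rw [show (9 : Int) = ((9 : Nat) : Int) from by norm_num]
        simp only [PySem.Str.toList_slice, PySem.Chars.slice_eq_listSlice, PySem.List.slice_from_natCast]
        rw [hr, show (9 : Nat) = "test/jdk/".toList.length from by decide, List.drop_left]
      have hne : PySem.Str.slice s (some (9 : Int)) none ≠ "" := by
        intro h0; apply hr0; rw [← hslice, h0]; rfl
      have hA : translate_src_path_to_ojluni_path s
          = some (OJLUNI_TEST_PATH ++ "test/" ++ PySem.Str.slice s (some (9 : Int)) none) := by
        simp [translate_src_path_to_ojluni_path, pvScan, UPSTREAM_TEST_PATHS, pvTruthy, hf1, hsw, hne]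
      have hc1 : ((s.toList.splitOn '/').map String.ofList).take 2 = ["test", "jdk"] := by
        rw [← List.map_take, hps]; rfl
      have hlen : 2 < ((s.toList.splitOn '/').map String.ofList).length := by
        have hpos := List.length_pos_iff.mpr (List.splitOnP_ne_nil (· == '/') r)
        rw [List.length_map, hps]
        simp only [List.length_cons, List.splitOn] at *
        omega
      rw [hA]
      unfold translate_src_path_to_ojluni_path_alt
      simp only [hparts, pvSlice2, pvSlice4]
      rw [if_pos ⟨Or.inr hc1, hlen⟩]
      refine congrArg some (String.toList_inj.mp ?_)
      rw [show PySem.List.slice ((s.toList.splitOn '/').map String.ofList) (some (2 : Int)) none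
            = ((s.toList.splitOn '/').map String.ofList).drop 2 from PySem.List.slice_from_natCast _ 2]
      rw [String.toList_append, String.toList_append, String.toList_append, hslice,
          pvJoinDrop s r ["test".toList, "jdk".toList] 2 (by rw [hps]; rfl) rfl]
      simp [OJLUNI_TEST_PATH]
    · by_cases e3 : ∃ r, s.toList = "jdk/src/share/classes/".toList ++ r
      · obtain ⟨r, hr⟩ := e3
        have hr0 : r ≠ [] := by
          rintro rfl
          exact hD (Or.inr (Or.inr (Or.inl (String.toList_inj.mp (by simpa using hr)))))
        have hf1 : PySem.Chars.startswith s.toList ['j','d','k','/','t','e','s','t','/'] = false :=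
          pvSwFalse s _ e1
        have hf2 : PySem.Chars.startswith s.toList ['t','e','s','t','/','j','d','k','/'] = false :=
          pvSwFalse s _ e2
        have hsw : PySem.Chars.startswith s.toList ['j','d','k','/','s','r','c','/','s','h','a','r','e','/','c','l','a','s','s','e','s','/'] = true := by
          rw [PySem.Chars.startswith_iff]
          exact ⟨r, hr.symm⟩
        have hps : s.toList.splitOn '/'
            = "jdk".toList :: "src".toList :: "share".toList :: "classes".toList :: r.splitOn '/' := by
          rw [hr, show "jdk/src/share/classes/".toList
                = ((["jdk".toList, "src".toList, "share".toList, "classes".toList].map (· ++ ['/'])).flatten) from by decide,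
              pvSplitOn_flatten _ (by decide) r]
          rfl
        have hslice : (PySem.Str.slice s (some (22 : Int)) none).toList = r := by
          rw [show (22 : Int) = ((22 : Nat) : Int) from by norm_num]
          simp only [PySem.Str.toList_slice, PySem.Chars.slice_eq_listSlice, PySem.List.slice_from_natCast]
          rw [hr, show (22 : Nat) = "jdk/src/share/classes/".toList.length from by decide, List.drop_left]
        have hne : PySem.Str.slice s (some (22 : Int)) none ≠ "" := by
          intro h0; apply hr0; rw [← hslice, h0]; rfl
        have hA : translate_src_path_to_ojluni_path s
            = some (OJLUNI_JAVA_BASE_PATH ++ PySem.Str.slice s (some (22 : Int)) none) := by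
          simp [translate_src_path_to_ojluni_path, pvScan, UPSTREAM_TEST_PATHS,
            UPSTREAM_JAVA_BASE_PATHS, pvTruthy, hf1, hf2, hsw, hne]
        have ht2 : ((s.toList.splitOn '/').map String.ofList).take 2 = ["jdk", "src"] := by
          rw [← List.map_take, hps]; rfl
        have hc1 : ((s.toList.splitOn '/').map String.ofList).take 4
            = ["jdk", "src", "share", "classes"] := by
          rw [← List.map_take, hps]; rfl
        have hlen : 4 < ((s.toList.splitOn '/').map String.ofList).length := by
          have hpos := List.length_pos_iff.mpr (List.splitOnP_ne_nil (· == '/') r)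
          rw [List.length_map, hps]
          simp only [List.length_cons, List.splitOn] at *
          omega
        rw [hA]
        unfold translate_src_path_to_ojluni_path_alt
        simp only [hparts, pvSlice2, pvSlice4]
        rw [if_neg (by rintro ⟨h | h, -⟩ <;> rw [ht2] at h <;> exact absurd h (by decide))]
        rw [if_pos ⟨Or.inl hc1, hlen⟩]
        refine congrArg some (String.toList_inj.mp ?_)
        rw [show PySem.List.slice ((s.toList.splitOn '/').map String.ofList) (some (4 : Int)) none
              = ((s.toList.splitOn '/').map String.ofList).drop 4 from PySem.List.slice_from_natCast _ 4]
        rw [String.toList_append, String.toList_append, hslice,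
            pvJoinDrop s r ["jdk".toList, "src".toList, "share".toList, "classes".toList] 4
              (by rw [hps]; rfl) rfl]
        simp [OJLUNI_JAVA_BASE_PATH]
      · by_cases e4 : ∃ r, s.toList = "src/java.base/share/classes/".toList ++ r
        · obtain ⟨r, hr⟩ := e4
          have hr0 : r ≠ [] := by
            rintro rfl
            exact hD (Or.inr (Or.inr (Or.inr (String.toList_inj.mp (by simpa using hr)))))
          have hf1 : PySem.Chars.startswith s.toList ['j','d','k','/','t','e','s','t','/'] = false :=
            pvSwFalse s _ e1
          have hf2 : PySem.Chars.startswith s.toList ['t','e','s','t','/','j','d','k','/'] = false :=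
            pvSwFalse s _ e2
          have hf3 : PySem.Chars.startswith s.toList ['j','d','k','/','s','r','c','/','s','h','a','r','e','/','c','l','a','s','s','e','s','/'] = false :=
            pvSwFalse s _ e3
          have hsw : PySem.Chars.startswith s.toList ['s','r','c','/','j','a','v','a','.','b','a','s','e','/','s','h','a','r','e','/','c','l','a','s','s','e','s','/'] = true := by
            rw [PySem.Chars.startswith_iff]
            exact ⟨r, hr.symm⟩
          have hps : s.toList.splitOn '/'
              = "src".toList :: "java.base".toList :: "share".toList :: "classes".toList :: r.splitOn '/' := by
            rw [hr, show "src/java.base/share/classes/".toList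
                  = ((["src".toList, "java.base".toList, "share".toList, "classes".toList].map (· ++ ['/'])).flatten) from by decide,
                pvSplitOn_flatten _ (by decide) r]
            rfl
          have hslice : (PySem.Str.slice s (some (28 : Int)) none).toList = r := by
            rw [show (28 : Int) = ((28 : Nat) : Int) from by norm_num]
            simp only [PySem.Str.toList_slice, PySem.Chars.slice_eq_listSlice, PySem.List.slice_from_natCast]
            rw [hr, show (28 : Nat) = "src/java.base/share/classes/".toList.length from by decide, List.drop_left]
          have hne : PySem.Str.slice s (some (28 : Int)) none ≠ "" := by
            intro h0; apply hr0; rw [← hslice, h0]; rfl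
          have hA : translate_src_path_to_ojluni_path s
              = some (OJLUNI_JAVA_BASE_PATH ++ PySem.Str.slice s (some (28 : Int)) none) := by
            simp [translate_src_path_to_ojluni_path, pvScan, UPSTREAM_TEST_PATHS,
              UPSTREAM_JAVA_BASE_PATHS, pvTruthy, hf1, hf2, hf3, hsw, hne]
          have ht2 : ((s.toList.splitOn '/').map String.ofList).take 2 = ["src", "java.base"] := by
            rw [← List.map_take, hps]; rfl
          have hc1 : ((s.toList.splitOn '/').map String.ofList).take 4
              = ["src", "java.base", "share", "classes"] := by
            rw [← List.map_take, hps]; rfl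
          have hlen : 4 < ((s.toList.splitOn '/').map String.ofList).length := by
            have hpos := List.length_pos_iff.mpr (List.splitOnP_ne_nil (· == '/') r)
            rw [List.length_map, hps]
            simp only [List.length_cons, List.splitOn] at *
            omega
          rw [hA]
          unfold translate_src_path_to_ojluni_path_alt
          simp only [hparts, pvSlice2, pvSlice4]
          rw [if_neg (by rintro ⟨h | h, -⟩ <;> rw [ht2] at h <;> exact absurd h (by decide))]
          rw [if_pos ⟨Or.inr hc1, hlen⟩]
          refine congrArg some (String.toList_inj.mp ?_)
          rw [show PySem.List.slice ((s.toList.splitOn '/').map String.ofList) (some (4 : Int)) none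
                = ((s.toList.splitOn '/').map String.ofList).drop 4 from PySem.List.slice_from_natCast _ 4]
          rw [String.toList_append, String.toList_append, hslice,
              pvJoinDrop s r ["src".toList, "java.base".toList, "share".toList, "classes".toList] 4
                (by rw [hps]; rfl) rfl]
          simp [OJLUNI_JAVA_BASE_PATH]
        · have hf1 : PySem.Chars.startswith s.toList ['j','d','k','/','t','e','s','t','/'] = false :=
            pvSwFalse s _ e1
          have hf2 : PySem.Chars.startswith s.toList ['t','e','s','t','/','j','d','k','/'] = false :=
            pvSwFalse s _ e2
          have hf3 : PySem.Chars.startswith s.toList ['j','d','k','/','s','r','c','/','s','h','a','r','e','/','c','l','a','s','s','e','s','/'] = false :=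
            pvSwFalse s _ e3
          have hf4 : PySem.Chars.startswith s.toList ['s','r','c','/','j','a','v','a','.','b','a','s','e','/','s','h','a','r','e','/','c','l','a','s','s','e','s','/'] = false :=
            pvSwFalse s _ e4
          have hA : translate_src_path_to_ojluni_path s = none := by
            simp [translate_src_path_to_ojluni_path, pvScan, UPSTREAM_TEST_PATHS,
              UPSTREAM_JAVA_BASE_PATHS, pvTruthy, hf1, hf2, hf3, hf4]
          rw [hA]
          unfold translate_src_path_to_ojluni_path_alt
          simp only [hparts, pvSlice2, pvSlice4]
          rw [if_neg, if_neg]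
          · rintro ⟨h | h, hl⟩
            · exact pvNoMatch s ["jdk", "src", "share", "classes"]
                ["jdk".toList, "src".toList, "share".toList, "classes".toList] rfl (by decide)
                "jdk/src/share/classes/".toList (by decide) e3 ⟨h, hl⟩
            · exact pvNoMatch s ["src", "java.base", "share", "classes"]
                ["src".toList, "java.base".toList, "share".toList, "classes".toList] rfl (by decide)
                "src/java.base/share/classes/".toList (by decide) e4 ⟨h, hl⟩
          · rintro ⟨h | h, hl⟩
            · exact pvNoMatch s ["jdk", "test"] ["jdk".toList, "test".toList] rfl (by decide)
                "jdk/test/".toList (by decide) e1 ⟨h, hl⟩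
            · exact pvNoMatch s ["test", "jdk"] ["test".toList, "jdk".toList] rfl (by decide)
                "test/jdk/".toList (by decide) e2 ⟨h, hl⟩

theorem translate_src_path_to_ojluni_path_changed : Claim_changed_translate_src_path_to_ojluni_path := by
  unfold Claim_changed_translate_src_path_to_ojluni_path; decide

theorem translate_src_path_to_ojluni_path_tight : Claim_exact_translate_src_path_to_ojluni_path := by
  intro s _ hD
  rcases hD with rfl | rfl | rfl | rfl <;> decide
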